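-- pv_equiv track=rewrite | github.com/bsinglet/cipher_tools | vigenere_cracking.py | initialize_patterns
-- ===== SOURCE A (Python) =====
-- def initialize_patterns(crypt_text, minimum_pattern_length=3):
--     """
--     Creates a dictionary, whose keys are strings of repeating patterns in the
--     crypt_text and whose values are lists of their occurences in the
--     crypt_text.
--     :param crypt_text: The text encrypted with a vigenere cipher.
--     :type crypt_text: str
--     :param minimum_pattern_length: The length (in characters) of repeating
--     patterns.
--     :return: The dictionary of patterns mentioned in the description of this
--     function.
--     :rtype: dict
--     """
--     patterns = dict()
--     for index in range(len(crypt_text)):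
--         if index + minimum_pattern_length > len(crypt_text):
--             break
--         current_pattern = crypt_text[index:index+minimum_pattern_length]
--         if current_pattern in patterns.keys():
--             patterns[current_pattern].append(index)
--         else:
--             patterns[current_pattern] = list()
--             patterns[current_pattern].append(index)
--     # remove any patterns that only occur once
--     copy_patterns = dict()
--     patterns = sorted(patterns.items(), key=lambda x: len(x[1]), reverse=True)
--     for each_pair in patterns:
--         if len(each_pair[1]) <= 1:
--             break
--         copy_patterns[each_pair[0]] = each_pair[1]
--     return copy_patterns
-- ===== SOURCE B (Python) =====
-- def initialize_patterns(crypt_text, minimum_pattern_length=3):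
--     n = len(crypt_text)
--     # collect every length-L window's start positions in one pass
--     positions = {}
--     for index in range(min(n, n - minimum_pattern_length + 1)):
--         positions.setdefault(crypt_text[index:index + minimum_pattern_length], []).append(index)
--     # bucket the repeated patterns by occurrence count (counting sort, no comparison sort)
--     buckets = {}
--     for pattern, occurrences in positions.items():
--         if len(occurrences) > 1:
--             buckets.setdefault(len(occurrences), []).append(pattern)
--     # emit buckets from the highest count down: stable descending order by count
--     result = {}
--     for count in range(n, 1, -1):
--         for pattern in buckets.get(count, []):
--             result[pattern] = positions[pattern]
--     return result
-- ===== Notes on version B (the rewrite author's own statement) =====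
-- stated objective: alternative
-- what changed: B replaces A's comparison sort of all patterns by occurrence count plus break-on-singleton with a counting/bucket pass: repeated patterns are bucketed by their count and the buckets are emitted from the highest count down, producing the same stably count-descending dict without ever sorting.
import Mathlib
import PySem

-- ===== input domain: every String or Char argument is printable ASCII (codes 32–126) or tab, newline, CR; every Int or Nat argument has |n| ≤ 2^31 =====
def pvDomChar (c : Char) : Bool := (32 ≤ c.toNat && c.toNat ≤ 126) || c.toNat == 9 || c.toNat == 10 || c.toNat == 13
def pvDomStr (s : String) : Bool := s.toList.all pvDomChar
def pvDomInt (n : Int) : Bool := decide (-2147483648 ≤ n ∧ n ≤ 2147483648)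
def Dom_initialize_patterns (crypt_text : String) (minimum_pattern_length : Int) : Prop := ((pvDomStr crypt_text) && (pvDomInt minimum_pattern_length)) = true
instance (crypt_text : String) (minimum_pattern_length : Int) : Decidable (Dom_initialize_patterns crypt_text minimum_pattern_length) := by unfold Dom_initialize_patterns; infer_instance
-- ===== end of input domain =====

-- B replaces A's comparison sort (by occurrence count, reverse) + break with a counting/bucket
-- pass emitted from the highest count down; same return value, same key order (objective: alternative).


-- ===== PORT A =====
-- 'for index in range(len(crypt_text)): if index + m > len: break; …' — the break is the recursion stopping
def pvAColl (cs : List Char) (m n : Int) : List Int → PySem.Dict String (List Int) → PySem.Dict String (List Int)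
  | [], patterns => patterns
  | index :: rest, patterns =>
    if index + m > n then patterns
    else
      let current_pattern := String.ofList (PySem.List.slice cs (some index) (some (index + m)))
      if patterns.contains current_pattern then
        pvAColl cs m n rest (patterns.modify current_pattern [] (fun l => l ++ [index]))
      else
        pvAColl cs m n rest ((patterns.insert current_pattern []).modify current_pattern [] (fun l => l ++ [index]))

-- 'for each_pair in patterns: if len ≤ 1: break; copy_patterns[k] = v'
def pvACopy : List (String × List Int) → PySem.Dict String (List Int) → PySem.Dict String (List Int)
  | [], copy_patterns => copy_patterns
  | each_pair :: rest, copy_patterns =>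
    if each_pair.2.length ≤ 1 then copy_patterns
    else pvACopy rest (copy_patterns.insert each_pair.1 each_pair.2)

def initialize_patterns (crypt_text : String) (minimum_pattern_length : Int) : List (String × List Int) :=
  let n : Int := PySem.Str.len crypt_text
  let patterns := pvAColl crypt_text.toList minimum_pattern_length n (PySem.List.pyRange 0 n 1) PySem.Dict.empty
  let sorted_items := PySem.List.sorted patterns.items (fun x => x.2.length) true
  (pvACopy sorted_items PySem.Dict.empty).items

-- ===== PORT B =====
def initialize_patterns_alt (crypt_text : String) (minimum_pattern_length : Int) : List (String × List Int) :=
  let n : Int := PySem.Str.len crypt_text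
  -- positions.setdefault(window, []).append(index), over the min(n, n-m+1) windows
  let positions := (PySem.List.pyRange 0 (min n (n - minimum_pattern_length + 1)) 1).foldl
    (fun d index => d.modify (String.ofList (PySem.List.slice crypt_text.toList (some index) (some (index + minimum_pattern_length)))) [] (fun l => l ++ [index]))
    PySem.Dict.empty
  -- buckets.setdefault(len(occurrences), []).append(pattern) for repeated patterns
  let buckets := positions.items.foldl
    (fun b p => if 1 < p.2.length then b.modify ((p.2.length : Int)) [] (fun l => l ++ [p.1]) else b)
    PySem.Dict.empty
  -- for count in range(n, 1, -1): for pattern in buckets.get(count, []): result[pattern] = positions[pattern]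
  -- (positions[pattern] never raises: every bucketed pattern is a key of positions; getD is exact here)
  let result := (PySem.List.pyRange n 1 (-1)).foldl
    (fun r count => (buckets.getD count []).foldl (fun r pattern => r.insert pattern (positions.getD pattern [])) r)
    PySem.Dict.empty
  result.items

-- ===== PRECONDITION & SPEC =====
def Spec_initialize_patterns (crypt_text : String) (minimum_pattern_length : Int) (out : List (String × List Int)) : Prop := out = initialize_patterns_alt crypt_text minimum_pattern_length
instance (crypt_text : String) (minimum_pattern_length : Int) (out : List (String × List Int)) : Decidable (Spec_initialize_patterns crypt_text minimum_pattern_length out) := by unfold Spec_initialize_patterns; infer_instance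

-- ===== CLAIM (what is proved, stated in full; the proofs are below) =====
def Claim_equal_initialize_patterns : Prop := ∀ (crypt_text : String) (minimum_pattern_length : Int), Dom_initialize_patterns crypt_text minimum_pattern_length → Spec_initialize_patterns crypt_text minimum_pattern_length (initialize_patterns crypt_text minimum_pattern_length)

-- ===== LEMMAS AND PROOFS =====

-- dicts with equal item lists are equal
theorem pvDictExt {κ ν : Type} (d e : PySem.Dict κ ν) (h : d.items = e.items) : d = e := by
  cases d; cases e; simpa using h

theorem pvInsertInsert {κ ν : Type} [BEq κ] [LawfulBEq κ] (d : PySem.Dict κ ν) (k : κ) (v w : ν) :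
    (d.insert k v).insert k w = d.insert k w := by
  apply pvDictExt
  by_cases h : d.contains k = true
  · rw [PySem.Dict.items_insert_of_contains _ _ (by simp [PySem.Dict.contains_insert, h]),
        PySem.Dict.items_insert_of_contains _ _ h, PySem.Dict.items_insert_of_contains _ _ h,
        List.map_map]
    apply List.map_congr_left
    intro p _
    by_cases hp : p.1 == k <;> simp [hp]
  · rw [PySem.Dict.items_insert_of_contains _ _ (by simp [PySem.Dict.contains_insert]),
        PySem.Dict.items_insert_of_not_contains _ _ (by simpa using h),
        PySem.Dict.items_insert_of_not_contains _ _ (by simpa using h)]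
    simp [PySem.Dict.contains] at h
    rw [List.map_append]
    congr 1
    · have hm : ∀ p ∈ d.items, (if (p.1 == k) = true then (k, w) else p) = p := by
        intro p hp
        by_cases hk : p.1 = k
        · obtain ⟨p1, p2⟩ := p; simp only at hk; subst hk; exact absurd hp (h p2)
        · simp [hk]
      rw [List.map_congr_left hm, List.map_id']
    · simp

theorem pvStepEq (d : PySem.Dict String (List Int)) (k : String) (i : Int) :
    (if d.contains k then d.modify k [] (fun l => l ++ [i])
     else (d.insert k []).modify k [] (fun l => l ++ [i])) = d.modify k [] (fun l => l ++ [i]) := by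
  by_cases h : d.contains k = true
  · simp [h]
  · simp only [h, if_neg, Bool.false_eq_true, not_false_iff, if_false]
    simp [PySem.Dict.modify, PySem.Dict.getD_insert_self,
      PySem.Dict.getD_of_not_contains _ _ (by simpa using h), pvInsertInsert]

-- A's break-loop over range(0,b) equals B's fold over the clamped range
theorem pvCollEq (cs : List Char) (m n : Int) : ∀ (b a : Int) (d : PySem.Dict String (List Int)),
    pvAColl cs m n (PySem.List.pyRange a b 1) d =
      (PySem.List.pyRange a (min b (n - m + 1)) 1).foldl
        (fun d index => d.modify (String.ofList (PySem.List.slice cs (some index) (some (index + m)))) [] (fun l => l ++ [index])) d := by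
  intro b
  have main : ∀ (k : Nat) (a : Int) (d : PySem.Dict String (List Int)), (b - a).toNat ≤ k →
      pvAColl cs m n (PySem.List.pyRange a b 1) d =
      (PySem.List.pyRange a (min b (n - m + 1)) 1).foldl
        (fun d index => d.modify (String.ofList (PySem.List.slice cs (some index) (some (index + m)))) [] (fun l => l ++ [index])) d := by
    intro k
    induction k with
    | zero =>
      intro a d h
      rw [PySem.List.pyRange_one_eq_nil (by omega), PySem.List.pyRange_one_eq_nil (by omega)]
      rfl
    | succ k ih =>
      intro a d h
      by_cases hab : a < b
      · rw [PySem.List.pyRange_one_cons hab]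
        by_cases hbr : a + m > n
        · rw [PySem.List.pyRange_one_eq_nil (le_trans (min_le_right _ _) (by omega))]
          simp only [pvAColl, if_pos hbr, List.foldl_nil]
        · have hcons : PySem.List.pyRange a (min b (n - m + 1)) 1
              = a :: PySem.List.pyRange (a + 1) (min b (n - m + 1)) 1 :=
            PySem.List.pyRange_one_cons (by omega)
          rw [hcons, List.foldl_cons]
          simp only [pvAColl, if_neg hbr]
          rw [← apply_ite (pvAColl cs m n (PySem.List.pyRange (a + 1) b 1)), pvStepEq]
          exact ih (a + 1) _ (by omega)
      · rw [PySem.List.pyRange_one_eq_nil (by omega), PySem.List.pyRange_one_eq_nil (by omega)]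
        rfl
  intro a d
  exact main (b - a).toNat a d le_rfl

-- keys stay Nodup along B's collection fold
theorem pvKeysNodup (cs : List Char) (m : Int) (I : List Int) (d : PySem.Dict String (List Int))
    (h : d.keys.Nodup) :
    ((I.foldl (fun d index => d.modify (String.ofList (PySem.List.slice cs (some index) (some (index + m)))) [] (fun l => l ++ [index])) d)).keys.Nodup := by
  induction I generalizing d with
  | nil => exact h
  | cons i I ih =>
    rw [List.foldl_cons]
    exact ih _ (PySem.Dict.nodup_keys_insert _ _ _ h)

-- every stored occurrence list is nonempty and no longer than the number of processed indices
theorem pvValBounds (cs : List Char) (m : Int) (I : List Int) : ∀ (d : PySem.Dict String (List Int)) (t : Nat),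
    (∀ p ∈ d.items, 1 ≤ p.2.length ∧ p.2.length ≤ t) →
    ∀ p ∈ (I.foldl (fun d index => d.modify (String.ofList (PySem.List.slice cs (some index) (some (index + m)))) [] (fun l => l ++ [index])) d).items,
      1 ≤ p.2.length ∧ p.2.length ≤ t + I.length := by
  induction I with
  | nil => intro d t h; simpa using h
  | cons i I ih =>
    intro d t h
    rw [List.foldl_cons]
    have hstep : ∀ p ∈ (PySem.Dict.modify d (String.ofList (PySem.List.slice cs (some i) (some (i + m)))) [] (fun l => l ++ [i])).items,
        1 ≤ p.2.length ∧ p.2.length ≤ t + 1 := by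
      intro p hp
      rw [PySem.Dict.modify] at hp
      rcases (PySem.Dict.mem_items_insert _ _ _ _).1 hp with hq | ⟨hq, _⟩
      · subst hq
        have hlen : (PySem.Dict.getD d (String.ofList (PySem.List.slice cs (some i) (some (i + m)))) ([] : List Int)).length ≤ t := by
          rw [PySem.Dict.getD_eq_get?_getD]
          cases hg : PySem.Dict.get? d (String.ofList (PySem.List.slice cs (some i) (some (i + m)))) with
          | none => simp
          | some v =>
            simp only [Option.getD_some]
            rw [PySem.Dict.get?] at hg
            rcases Option.map_eq_some_iff.1 hg with ⟨q, hfind, hv⟩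
            exact hv ▸ (h q (List.mem_of_find?_eq_some hfind)).2
        constructor <;> simp <;> omega
      · have := h p hq; omega
    have := ih _ (t + 1) hstep
    intro p hp
    have := this p hp
    simp only [List.length_cons]
    omega

-- the bucket for count c collects, in order, the repeated patterns whose list has length c
theorem pvBucketsGetD (M : List (String × List Int)) : ∀ (b : PySem.Dict Int (List String)) (c : Int),
    ((M.foldl (fun b p => if 1 < p.2.length then b.modify ((p.2.length : Int)) [] (fun l => l ++ [p.1]) else b) b)).getD c []
      = b.getD c [] ++ (M.filter (fun p => decide (1 < p.2.length) && ((p.2.length : Int) == c))).map Prod.fst := by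
  induction M with
  | nil => simp
  | cons q M ih =>
    intro b c
    rw [List.foldl_cons]
    by_cases h1 : 1 < q.2.length
    · rw [if_pos h1, ih, PySem.Dict.getD_modify]
      by_cases h2 : (q.2.length : Int) = c
      · rw [if_pos h2.symm]
        simp [List.filter_cons, h1, h2]
      · rw [if_neg (fun hc => h2 hc.symm)]
        simp [List.filter_cons, h1, h2]
    · rw [if_neg h1, ih]
      simp [List.filter_cons, h1]

-- A's copy loop appends the kept prefix (fresh keys) behind the accumulator
theorem pvCopyEq : ∀ (l : List (String × List Int)) (d : PySem.Dict String (List Int)),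
    (l.map Prod.fst).Nodup → (∀ p ∈ l, d.contains p.1 = false) →
    (pvACopy l d).items = d.items ++ l.takeWhile (fun p => !(p.2.length ≤ 1 : Bool)) := by
  intro l
  induction l with
  | nil => intro d _ _; simp [pvACopy]
  | cons q l ih =>
    intro d hnd hfresh
    by_cases hq : q.2.length ≤ 1
    · have hstop : pvACopy (q :: l) d = d := by simp [pvACopy, hq]
      rw [hstop, List.takeWhile_cons]
      simp [hq]
    · have hnd' : (q.1 :: (l.map Prod.fst)).Nodup := by rw [List.map_cons] at hnd; exact hnd
      have hstep : pvACopy (q :: l) d = pvACopy l (d.insert q.1 q.2) := by simp [pvACopy, hq]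
      rw [hstep, ih _ (List.nodup_cons.1 hnd').2 ?_,
        PySem.Dict.items_insert_of_not_contains _ _ (hfresh q (by simp)), List.takeWhile_cons]
      · simp [hq]
      · intro p hp
        rw [PySem.Dict.contains_insert]
        have hne : p.1 ≠ q.1 := by
          intro he
          have hmem : p.1 ∈ l.map Prod.fst := List.mem_map_of_mem hp
          rw [he] at hmem
          exact (List.nodup_cons.1 hnd').1 hmem
        simp [hne, hfresh p (List.mem_cons_of_mem _ hp)]

-- B's result loop appends the fresh pairs behind the accumulator
theorem pvResultEq (P : PySem.Dict String (List Int)) (bk : PySem.Dict Int (List String)) :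
    ∀ (cs : List Int) (r : PySem.Dict String (List Int)),
    ((cs.flatMap (fun c => bk.getD c [])).Nodup) →
    (∀ s ∈ cs.flatMap (fun c => bk.getD c []), r.contains s = false) →
    (cs.foldl (fun r count => (bk.getD count []).foldl (fun r pattern => r.insert pattern (P.getD pattern [])) r) r).items
      = r.items ++ (cs.flatMap (fun c => bk.getD c [])).map (fun pattern => (pattern, P.getD pattern [])) := by
  have inner : ∀ (pats : List String) (r : PySem.Dict String (List Int)), pats.Nodup →
      (∀ s ∈ pats, r.contains s = false) →
      (pats.foldl (fun r pattern => r.insert pattern (P.getD pattern [])) r).items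
        = r.items ++ pats.map (fun pattern => (pattern, P.getD pattern [])) := by
    intro pats
    induction pats with
    | nil => intro r _ _; simp
    | cons q pats ih =>
      intro r hnd hfresh
      rw [List.foldl_cons, ih _ (List.nodup_cons.1 hnd).2 ?_,
        PySem.Dict.items_insert_of_not_contains _ _ (hfresh q (by simp))]
      · simp
      · intro s hs
        rw [PySem.Dict.contains_insert]
        have hne : s ≠ q := fun he => (List.nodup_cons.1 hnd).1 (he ▸ hs)
        simp [hne, hfresh s (List.mem_cons_of_mem _ hs)]
  intro cs
  induction cs with
  | nil => intro r _ _; simp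
  | cons c cs ih =>
    intro r hnd hfresh
    rw [List.flatMap_cons] at hnd hfresh ⊢
    have hinner := inner (bk.getD c []) r (List.Nodup.of_append_left hnd)
      (fun s hs => hfresh s (List.mem_append_left _ hs))
    rw [List.foldl_cons, ih _ (List.Nodup.of_append_right hnd) ?_, hinner]
    · simp
    · intro s hs
      have h1 : r.contains s = false := hfresh s (List.mem_append_right _ hs)
      have hdisj := List.disjoint_of_nodup_append hnd
      simp only [PySem.Dict.contains] at h1 ⊢
      rw [hinner, List.any_append, h1]
      simp only [Bool.false_or, List.any_map, List.any_eq_false, Function.comp_apply, beq_iff_eq]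
      intro t ht hts
      exact hdisj (hts ▸ ht) hs

-- the bucketed form of a list whose lists have length in [1, hi]
def pvF (hi : Nat) (M : List (String × List Int)) : List (String × List Int) :=
  (PySem.List.pyRange (hi : Int) 0 (-1)).flatMap (fun c => M.filter (fun p => ((p.2.length : Int) == c)))

theorem pvMemF {hi : Nat} {M : List (String × List Int)} {p : String × List Int} (h : p ∈ pvF hi M) :
    p ∈ M ∧ 1 ≤ p.2.length ∧ p.2.length ≤ hi := by
  unfold pvF at h
  rcases List.mem_flatMap.1 h with ⟨c, hc, hp⟩
  rcases PySem.List.mem_pyRange_neg_one.1 hc with ⟨hc0, hchi⟩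
  rcases List.mem_filter.1 hp with ⟨hpM, hpc⟩
  have : (p.2.length : Int) = c := by simpa using hpc
  exact ⟨hpM, by omega, by omega⟩

-- insertBy walks past a prefix it does not insert into
theorem pvInsertByAppend {α : Type} (before : α → α → Bool) (x : α) (as bs : List α)
    (h : ∀ a ∈ as, before x a = false) :
    PySem.List.insertBy before x (as ++ bs) = as ++ PySem.List.insertBy before x bs := by
  induction as with
  | nil => simp
  | cons a as ih =>
    rw [List.cons_append, PySem.List.insertBy, h a (by simp), List.cons_append]
    simp only [Bool.false_eq_true, if_false]
    rw [ih (fun a ha => h a (List.mem_cons_of_mem _ ha))]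

-- insertBy puts x in front when it goes before everything
theorem pvInsertByFront {α : Type} (before : α → α → Bool) (x : α) (bs : List α)
    (h : ∀ b ∈ bs, before x b = true) :
    PySem.List.insertBy before x bs = x :: bs := by
  cases bs with
  | nil => rfl
  | cons b bs => rw [PySem.List.insertBy, h b (by simp)]; simp

-- appending an element whose length exceeds hi does not change the bucketed form
theorem pvFAppendHigh (hi : Nat) (M : List (String × List Int)) (x : String × List Int)
    (hx : hi < x.2.length) : pvF hi (M ++ [x]) = pvF hi M := by
  unfold pvF
  apply List.flatMap_congr
  intro c hc
  rcases PySem.List.mem_pyRange_neg_one.1 hc with ⟨hc0, hchi⟩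
  rw [List.filter_append]
  have : ((x.2.length : Int) == c) = false := by
    simp only [beq_eq_false_iff_ne, ne_eq]
    omega
  simp [this]

theorem pvInsertByF (x : String × List Int) (hi : Nat) (M : List (String × List Int))
    (h1 : 1 ≤ x.2.length) (h2 : x.2.length ≤ hi) :
    PySem.List.insertBy (fun a b => decide ((b : String × List Int).2.length < a.2.length)) x (pvF hi M) = pvF hi (M ++ [x]) := by
  induction hi generalizing M with
  | zero => omega
  | succ hi ih =>
    have hsplit : ∀ (N : List (String × List Int)), pvF (hi + 1) N
        = N.filter (fun p => ((p.2.length : Int) == ((hi : Int) + 1))) ++ pvF hi N := by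
      intro N
      unfold pvF
      rw [show ((hi + 1 : Nat) : Int) = (hi : Int) + 1 by push_cast; ring,
        PySem.List.pyRange_neg_one_cons (by omega), List.flatMap_cons]
      simp
    rw [hsplit M, hsplit (M ++ [x])]
    have hfilterlen : ∀ p ∈ M.filter (fun p => ((p.2.length : Int) == ((hi : Int) + 1))), p.2.length = hi + 1 := by
      intro p hp
      have := (List.mem_filter.1 hp).2
      have : (p.2.length : Int) = (hi : Int) + 1 := by simpa using this
      omega
    by_cases hx : x.2.length = hi + 1
    · rw [pvInsertByAppend _ _ _ _ (fun a ha => by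
        have := hfilterlen a ha; simp [this, hx])]
      rw [pvInsertByFront _ _ _ (fun b hb => by
        have := (pvMemF hb).2.2; simp only [decide_eq_true_eq]; omega)]
      rw [List.filter_append, pvFAppendHigh hi M x (by omega)]
      have : ([x].filter (fun p => ((p.2.length : Int) == ((hi : Int) + 1)))) = [x] := by
        simp [hx]
      rw [this]
      simp
    · have hxle : x.2.length ≤ hi := by omega
      rw [pvInsertByAppend _ _ _ _ (fun a ha => by
        have := hfilterlen a ha; simp only [decide_eq_false_iff_not, not_lt]; omega)]
      rw [ih M hxle]
      rw [List.filter_append]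
      have : ([x].filter (fun p => ((p.2.length : Int) == ((hi : Int) + 1)))) = [] := by
        simp only [List.filter_cons, List.filter_nil]
        have : ((x.2.length : Int) == ((hi : Int) + 1)) = false := by
          simp only [beq_eq_false_iff_ne, ne_eq]; omega
        simp [this]
      rw [this]
      simp

-- Python's stable descending sort by length IS the bucket concatenation, highest count first
theorem pvSortedEqF (hi : Nat) : ∀ (M : List (String × List Int)),
    (∀ p ∈ M, 1 ≤ p.2.length ∧ p.2.length ≤ hi) →
    PySem.List.sorted M (fun x => x.2.length) true = pvF hi M := by
  intro M
  induction M using List.reverseRecOn with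
  | nil =>
    intro _
    have : PySem.List.sorted ([] : List (String × List Int)) (fun x => x.2.length) true = [] := rfl
    rw [this]
    unfold pvF
    simp
  | append_singleton M x ih =>
    intro h
    rw [PySem.List.sorted_rev_eq_foldl_insertBy, List.foldl_append, List.foldl_cons, List.foldl_nil,
      ← PySem.List.sorted_rev_eq_foldl_insertBy,
      ih (fun p hp => h p (List.mem_append_left _ hp)),
      pvInsertByF x hi M (h x (by simp)).1 (h x (by simp)).2]

-- everything after the collection pass: stable sort + break = buckets emitted highest count first
theorem pvPostEq (P : PySem.Dict String (List Int)) (hi : Nat)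
    (hnd : P.keys.Nodup)
    (hb : ∀ p ∈ P.items, 1 ≤ p.2.length ∧ p.2.length ≤ hi) :
    (pvACopy (PySem.List.sorted P.items (fun x => x.2.length) true) PySem.Dict.empty).items =
    ((PySem.List.pyRange (hi : Int) 1 (-1)).foldl
      (fun r count => (((P.items.foldl
          (fun b p => if 1 < p.2.length then b.modify ((p.2.length : Int)) [] (fun l => l ++ [p.1]) else b)
          PySem.Dict.empty)).getD count []).foldl
        (fun r pattern => r.insert pattern (P.getD pattern [])) r)
      PySem.Dict.empty).items := by
  set L := P.items with hL
  set buckets := L.foldl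
      (fun b p => if 1 < p.2.length then b.modify ((p.2.length : Int)) [] (fun l => l ++ [p.1]) else b)
      PySem.Dict.empty with hbk
  have hndL : (L.map Prod.fst).Nodup := hnd
  have hgetD : ∀ p ∈ L, P.getD p.1 [] = p.2 := by
    intro p hp
    rw [PySem.Dict.getD_eq_get?_getD, PySem.Dict.get?_of_mem_items P (show (p.1, p.2) ∈ P.items by simpa using hp) hnd]
    rfl
  have hsorted : PySem.List.sorted L (fun x => x.2.length) true = pvF hi L := pvSortedEqF hi L hb
  have hperm : (PySem.List.sorted L (fun x => x.2.length) true).Perm L := PySem.List.sorted_perm _ _ _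
  have hndS : ((PySem.List.sorted L (fun x => x.2.length) true).map Prod.fst).Nodup :=
    ((hperm.map Prod.fst).nodup_iff).2 hndL
  have hA : (pvACopy (PySem.List.sorted L (fun x => x.2.length) true) PySem.Dict.empty).items
      = (PySem.List.sorted L (fun x => x.2.length) true).takeWhile (fun p => !(p.2.length ≤ 1 : Bool)) := by
    rw [pvCopyEq _ _ hndS (fun p _ => by simp [PySem.Dict.contains, PySem.Dict.empty])]
    simp [PySem.Dict.empty]
  set X := (PySem.List.pyRange (hi : Int) 1 (-1)).flatMap
      (fun c => L.filter (fun p => ((p.2.length : Int) == c))) with hX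
  have hTW : (pvF hi L).takeWhile (fun p => !(p.2.length ≤ 1 : Bool)) = X := by
    have hnil : ∀ (Y : List (String × List Int)), (∀ y ∈ Y, y.2.length ≤ 1) →
        Y.takeWhile (fun p => !(p.2.length ≤ 1 : Bool)) = [] := by
      intro Y hY
      cases Y with
      | nil => rfl
      | cons y Y =>
        rw [List.takeWhile_cons]
        simp [hY y (by simp)]
    by_cases h0 : hi = 0
    · subst h0
      unfold pvF
      rw [PySem.List.pyRange_neg_one_eq_nil (by omega)]
      rw [show X = ((PySem.List.pyRange ((0:Nat) : Int) 1 (-1)).flatMap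
        (fun c => L.filter (fun p => ((p.2.length : Int) == c)))) from hX,
        PySem.List.pyRange_neg_one_eq_nil (by omega)]
      rfl
    · have hsplit : PySem.List.pyRange (hi : Int) 0 (-1) = PySem.List.pyRange (hi : Int) 1 (-1) ++ [1] := by
        rw [PySem.List.pyRange_neg_one_eq_reverse, PySem.List.pyRange_neg_one_eq_reverse (a := (hi : Int)) (b := 1)]
        rw [show (0 : Int) + 1 = 1 from rfl]
        rw [PySem.List.pyRange_one_append 1 2 ((hi : Int) + 1) (by omega) (by omega), List.reverse_append]
        congr 1
      have hpos : ∀ p ∈ (PySem.List.pyRange (hi : Int) 1 (-1)).flatMap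
          (fun c => L.filter (fun p => ((p.2.length : Int) == c))),
          (fun p => !((p : String × List Int).2.length ≤ 1 : Bool)) p = true := by
        intro p hp
        rcases List.mem_flatMap.1 hp with ⟨c, hc, hpf⟩
        rcases PySem.List.mem_pyRange_neg_one.1 hc with ⟨hc1, _⟩
        have hlc := (List.mem_filter.1 hpf).2
        have hlen : (p.2.length : Int) = c := by simpa using hlc
        have h1 : ¬ (p.2.length ≤ 1) := by omega
        simp [h1]
      have hones : ∀ y ∈ L.filter (fun p => ((p.2.length : Int) == (1 : Int))), y.2.length ≤ 1 := by
        intro y hy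
        have := (List.mem_filter.1 hy).2
        have : (y.2.length : Int) = 1 := by simpa using this
        omega
      unfold pvF
      rw [hsplit, List.flatMap_append, List.takeWhile_append_of_pos hpos]
      simp only [List.flatMap_cons, List.flatMap_nil, List.append_nil]
      rw [hnil _ hones, List.append_nil]
  have hQc : ∀ c ∈ PySem.List.pyRange (hi : Int) 1 (-1),
      buckets.getD c [] = (L.filter (fun p => ((p.2.length : Int) == c))).map Prod.fst := by
    intro c hc
    rcases PySem.List.mem_pyRange_neg_one.1 hc with ⟨hc1, _⟩
    rw [hbk, pvBucketsGetD]
    have hemp : (PySem.Dict.empty : PySem.Dict Int (List String)).getD c [] = [] := by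
      simp [PySem.Dict.getD, PySem.Dict.get?, PySem.Dict.empty]
    rw [hemp, List.nil_append]
    congr 1
    apply List.filter_congr
    intro p _
    by_cases hbe : ((p.2.length : Int) == c) = true
    · have : (p.2.length : Int) = c := by simpa using hbe
      have : 1 < p.2.length := by omega
      simp [hbe, this]
    · simp [Bool.eq_false_iff.2 hbe]
  set Q := (PySem.List.pyRange (hi : Int) 1 (-1)).flatMap (fun c => buckets.getD c []) with hQ
  have hQX : Q = X.map Prod.fst := by
    rw [hQ, hX, List.map_flatMap]
    exact List.flatMap_congr hQc
  have hXsub : X = (PySem.List.sorted L (fun x => x.2.length) true).takeWhile (fun p => !(p.2.length ≤ 1 : Bool)) := by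
    rw [hsorted, hTW]
  have hndQ : Q.Nodup := by
    rw [hQX, hXsub]
    exact ((List.takeWhile_sublist _).map Prod.fst).nodup hndS
  have hB := pvResultEq P buckets (PySem.List.pyRange (hi : Int) 1 (-1)) PySem.Dict.empty
    (by rw [← hQ]; exact hndQ)
    (by intro s _; simp [PySem.Dict.contains, PySem.Dict.empty])
  rw [hA, hsorted, hTW, hB]
  have hQfn : Q.map (fun pattern => (pattern, P.getD pattern [])) = X := by
    rw [hQX, List.map_map]
    have hid : ∀ p ∈ X, ((fun pattern => (pattern, P.getD pattern [])) ∘ Prod.fst) p = p := by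
      intro p hp
      have hpL : p ∈ L := by
        rcases List.mem_flatMap.1 hp with ⟨c, _, hpf⟩
        exact (List.mem_filter.1 hpf).1
      simp [Function.comp, hgetD p hpL]
    rw [List.map_congr_left hid, List.map_id']
  rw [← hQ] at *
  rw [hQfn]
  simp [PySem.Dict.empty]

-- ===== VERDICT (by name: the statement is the Claim_ definition above) =====
theorem initialize_patterns_spec : Claim_equal_initialize_patterns := by
  intro ct m _
  unfold Spec_initialize_patterns
  simp only [initialize_patterns, initialize_patterns_alt]
  rw [pvCollEq, PySem.Str.len_eq]
  apply pvPostEq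
  · exact pvKeysNodup ct.toList m _ PySem.Dict.empty (by simp [PySem.Dict.keys, PySem.Dict.empty])
  · intro p hp
    have := pvValBounds ct.toList m
      (PySem.List.pyRange 0 (min (ct.toList.length : Int) ((ct.toList.length : Int) - m + 1)) 1)
      PySem.Dict.empty 0 (by simp [PySem.Dict.empty]) p hp
    rw [PySem.List.length_pyRange_one] at this
    constructor
    · exact this.1
    · have h2 := this.2
      omega
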